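-- pv_equiv track=rewrite | github.com/AdamSeidman/SDAQ | Python/lib/tools.py | apply_rollover_fix_test
-- ===== SOURCE A (Python) =====
-- def apply_rollover_fix_test(data, c=75):
--     if len(data) <= 2:
--         return data
--     for i in range(1, len(data)):
--         lastVal = data[i-1]
--         ndiff = abs(lastVal - (data[i] - 255))
--         diff = abs(lastVal - data[i])
--         pdiff = abs(lastVal - (data[i] + 255))
--         dmin = min(ndiff, diff, pdiff)
--         if abs(dmin - diff) > c:
--             if ndiff == dmin:
--                 for n in range(i, len(data)):
--                     data[n] -= 255
--             elif pdiff == dmin: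
--                 for n in range(i, len(data)):
--                     data[n] += 255
--         lastVal = data[i]
--     return data
-- ===== SOURCE B (Python) =====
-- def apply_rollover_fix_test(data, c=75):
--     if len(data) <= 2:
--         return data
--     off = 0
--     out = [data[0]]
--     for prev, cur in zip(data, data[1:]):
--         d = prev - cur
--         dmin = min(abs(d + 255), abs(d), abs(d - 255))
--         if abs(dmin - abs(d)) > c:
--             if abs(d + 255) == dmin:
--                 off -= 255
--             elif abs(d - 255) == dmin:
--                 off += 255
--         out.append(cur + off)
--     data[:] = out
--     return data
-- ===== Notes on version B (the rewrite author's own statement) =====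
-- stated objective: alternative
-- what changed: A re-shifts the whole remaining suffix by 255 inside the scan on every detected rollover (nested loops); B makes one pass over adjacent pairs of the original values (the accumulated offset cancels in the comparisons), maintaining a single cumulative offset and emitting each corrected element once.
import Mathlib
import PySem

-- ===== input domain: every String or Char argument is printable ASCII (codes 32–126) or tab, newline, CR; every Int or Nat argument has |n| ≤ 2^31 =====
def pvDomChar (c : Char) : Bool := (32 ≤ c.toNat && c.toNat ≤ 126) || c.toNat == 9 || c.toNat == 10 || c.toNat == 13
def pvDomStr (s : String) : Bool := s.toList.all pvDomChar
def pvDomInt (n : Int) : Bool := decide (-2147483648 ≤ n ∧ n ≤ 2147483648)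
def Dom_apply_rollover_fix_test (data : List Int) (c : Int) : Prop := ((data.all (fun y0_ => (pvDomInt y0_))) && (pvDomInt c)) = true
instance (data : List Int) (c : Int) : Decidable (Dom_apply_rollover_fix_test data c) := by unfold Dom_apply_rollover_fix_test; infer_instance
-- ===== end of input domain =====

-- B replaces A's per-rollover suffix re-shifting (a nested loop) with a single pass over adjacent
-- pairs carrying a cumulative offset. Both Pythons mutate `data` in place to the same final content;
-- the theorems here are about the return value.

-- ===== PORT A =====
-- One outer-loop iteration of A (indexing/assignment via pyGetD/pySetD: every index touched is
-- nonnegative and in range on A's actual states, so they are exact there).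
def pvAStep (c : Int) (d : List Int) (i : Int) : List Int :=
  let lastVal := PySem.List.pyGetD d (i - 1) 0
  let cur := PySem.List.pyGetD d i 0
  let ndiff := |lastVal - (cur - 255)|
  let diff := |lastVal - cur|
  let pdiff := |lastVal - (cur + 255)|
  let dmin := min (min ndiff diff) pdiff
  if |dmin - diff| > c then
    if ndiff = dmin then
      (PySem.List.pyRange i (d.length : Int) 1).foldl
        (fun d2 n => PySem.List.pySetD d2 n (PySem.List.pyGetD d2 n 0 - 255)) d
    else if pdiff = dmin then
      (PySem.List.pyRange i (d.length : Int) 1).foldl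
        (fun d2 n => PySem.List.pySetD d2 n (PySem.List.pyGetD d2 n 0 + 255)) d
    else d
  else d

def apply_rollover_fix_test (data : List Int) (c : Int) : List Int :=
  if data.length ≤ 2 then data
  else (PySem.List.pyRange 1 (data.length : Int) 1).foldl (pvAStep c) data

-- ===== PORT B =====
-- One iteration of B's single pass: pc = (prev, cur), state = (running offset, output list).
def pvBStep (c : Int) (st : Int × List Int) (pc : Int × Int) : Int × List Int :=
  let d := pc.1 - pc.2
  let dmin := min (min |d + 255| |d|) |d - 255|
  let off :=
    if abs (dmin - |d|) > c then
      if |d + 255| = dmin then st.1 - 255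
      else if |d - 255| = dmin then st.1 + 255
      else st.1
    else st.1
  (off, st.2 ++ [pc.2 + off])

def apply_rollover_fix_test_alt (data : List Int) (c : Int) : List Int :=
  if data.length ≤ 2 then data
  else ((data.zip data.tail).foldl (pvBStep c) (0, data.take 1)).2

-- ===== PRECONDITION & SPEC =====
def Spec_apply_rollover_fix_test (data : List Int) (c : Int) (out : List Int) : Prop := out = apply_rollover_fix_test_alt data c
instance (data : List Int) (c : Int) (out : List Int) : Decidable (Spec_apply_rollover_fix_test data c out) := by unfold Spec_apply_rollover_fix_test; infer_instance

-- ===== CLAIM (what is proved, stated in full; the proofs are below) =====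
def Claim_equal_apply_rollover_fix_test : Prop := ∀ (data : List Int) (c : Int), Dom_apply_rollover_fix_test data c → Spec_apply_rollover_fix_test data c (apply_rollover_fix_test data c)

-- ===== LEMMAS AND PROOFS =====

/-- The per-pair rollover correction both programs decide on (offsets cancel in the comparisons). -/
def pvDelta (c prev y : Int) : Int :=
  let d := prev - y
  let dmin := min (min |d + 255| |d|) |d - 255|
  if abs (dmin - |d|) > c then
    if |d + 255| = dmin then -255
    else if |d - 255| = dmin then 255
    else 0
  else 0

/-- Functional model shared by both proofs: emit each element plus the running cumulative offset. -/
def pvGo (c : Int) (prev off : Int) : List Int → List Int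
  | [] => []
  | y :: ys =>
    let off' := off + pvDelta c prev y
    (y + off') :: pvGo c y off' ys

/-- A's inner suffix loop shifts every element from the split point on by `v`. -/
theorem pv_inner_shift (v : Int) :
    ∀ (suf pre : List Int),
      (PySem.List.pyRange (pre.length : Int) ((pre ++ suf).length : Int) 1).foldl
        (fun d2 n => PySem.List.pySetD d2 n (PySem.List.pyGetD d2 n 0 + v)) (pre ++ suf)
      = pre ++ suf.map (· + v) := by
  intro suf
  induction suf with
  | nil =>
    intro pre
    rw [PySem.List.pyRange_one_eq_nil (by simp)]
    simp
  | cons y ys ih =>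
    intro pre
    have hlt : (pre.length : Int) < ((pre ++ y :: ys).length : Int) := by
      simp
    rw [PySem.List.pyRange_one_cons hlt]
    simp only [List.foldl_cons]
    have hget : PySem.List.pyGetD (pre ++ y :: ys) (pre.length : Int) 0 = y := by
      rw [PySem.List.pyGetD_natCast]
      simp
    have hset : PySem.List.pySetD (pre ++ y :: ys) (pre.length : Int) (y + v)
        = (pre ++ [y + v]) ++ ys := by
      rw [PySem.List.pySetD_natCast]
      rw [List.set_append_right _ _ (le_refl pre.length)]
      simp
    rw [hget, hset]
    have hlen1 : ((pre ++ [y + v]).length : Int) = (pre.length : Int) + 1 := by simp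
    have hlen2 : ((pre ++ [y + v] ++ ys).length : Int) = ((pre ++ y :: ys).length : Int) := by
      simp
    have := ih (pre ++ [y + v])
    rw [hlen1, hlen2] at this
    rw [this]
    simp

/-- One outer iteration of A on its invariant state shape: it shifts the whole suffix by the
shared correction `pvDelta c prev y` (the offset `off` cancels in all comparisons). -/
theorem pv_step_eq (c : Int) (pre tl : List Int) (prev off y : Int) :
    pvAStep c (pre ++ (prev + off) :: (y + off) :: tl) ((pre.length : Int) + 1)
      = (pre ++ [prev + off]) ++ ((y + off) :: tl).map (· + pvDelta c prev y) := by
  unfold pvAStep pvDelta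
  have hget1 : PySem.List.pyGetD (pre ++ (prev + off) :: (y + off) :: tl)
      ((pre.length : Int) + 1 - 1) 0 = prev + off := by
    rw [show ((pre.length : Int) + 1 - 1) = (pre.length : Int) by ring,
      PySem.List.pyGetD_natCast]
    simp
  have hget2 : PySem.List.pyGetD (pre ++ (prev + off) :: (y + off) :: tl)
      ((pre.length : Int) + 1) 0 = y + off := by
    rw [show ((pre.length : Int) + 1) = ((pre.length + 1 : Nat) : Int) by push_cast; ring,
      PySem.List.pyGetD_natCast]
    simp [List.getD]
  have e1 : (prev + off) - ((y + off) - 255) = (prev - y) + 255 := by ring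
  have e2 : (prev + off) - (y + off) = prev - y := by ring
  have e3 : (prev + off) - ((y + off) + 255) = (prev - y) - 255 := by ring
  simp only [hget1, hget2, e1, e2, e3]
  have hsplit : pre ++ (prev + off) :: (y + off) :: tl
      = (pre ++ [prev + off]) ++ ((y + off) :: tl) := by simp
  have hstart : ((pre.length : Int) + 1) = (((pre ++ [prev + off]).length : Int)) := by simp
  split_ifs with h1 h2 h3
  · -- subtract 255 from the suffix
    simp only [sub_eq_add_neg]
    rw [hsplit, hstart]
    exact pv_inner_shift (-255) _ _
  · -- add 255 to the suffix
    rw [hsplit, hstart]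
    exact pv_inner_shift 255 _ _
  · simp
  · simp

/-- A's outer loop, on the invariant state shape, computes the model `pvGo`. -/
theorem pv_A_loop (c : Int) :
    ∀ (suf pre : List Int) (prev off : Int),
      (PySem.List.pyRange ((pre.length : Int) + 1)
          ((pre ++ (prev + off) :: suf.map (· + off)).length : Int) 1).foldl
        (pvAStep c) (pre ++ (prev + off) :: suf.map (· + off))
      = pre ++ (prev + off) :: pvGo c prev off suf := by
  intro suf
  induction suf with
  | nil =>
    intro pre prev off
    rw [PySem.List.pyRange_one_eq_nil (by simp)]
    simp [pvGo]
  | cons y ys ih =>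
    intro pre prev off
    have hlt : ((pre.length : Int) + 1)
        < ((pre ++ (prev + off) :: (y :: ys).map (· + off)).length : Int) := by
      simp
    rw [PySem.List.pyRange_one_cons hlt]
    simp only [List.map_cons, List.foldl_cons]
    rw [pv_step_eq]
    have hmap : ((y + off) :: ys.map (· + off)).map (· + pvDelta c prev y)
        = (y + (off + pvDelta c prev y)) :: ys.map (· + (off + pvDelta c prev y)) := by
      simp only [List.map_cons, List.map_map, Function.comp_def]
      refine congrArg₂ List.cons (by ring) (List.map_congr_left fun x _ => by ring)
    rw [hmap]
    have hstart : (((pre ++ [prev + off]).length : Int) + 1) = ((pre.length : Int) + 1 + 1) := by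
      simp only [List.length_append, List.length_cons, List.length_nil]
      push_cast
      ring
    have hlen : ((pre ++ (prev + off) :: (y + off) :: ys.map (· + off)).length : Int)
        = (((pre ++ [prev + off]) ++ (y + (off + pvDelta c prev y))
            :: ys.map (· + (off + pvDelta c prev y))).length : Int) := by
      simp
    rw [hlen]
    have ih' := ih (pre ++ [prev + off]) y (off + pvDelta c prev y)
    rw [hstart] at ih'
    rw [ih']
    simp [pvGo]

theorem pv_B_fold (c : Int) :
    ∀ (rest : List Int) (x off : Int) (acc : List Int),
      (((x :: rest).zip rest).foldl (pvBStep c) (off, acc)).2 = acc ++ pvGo c x off rest := by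
  intro rest
  induction rest with
  | nil => intro x off acc; simp [pvGo]
  | cons y ys ih =>
    intro x off acc
    simp only [List.zip_cons_cons, List.foldl_cons]
    rw [show pvBStep c (off, acc) (x, y)
        = (off + pvDelta c x y, acc ++ [y + (off + pvDelta c x y)]) by
      unfold pvBStep pvDelta
      dsimp only
      split_ifs <;> (simp; try ring)]
    rw [ih]
    simp [pvGo]

-- ===== VERDICT (by name: the statement is the Claim_ definition above) =====
theorem apply_rollover_fix_test_spec : Claim_equal_apply_rollover_fix_test := by
  intro data c _
  unfold Spec_apply_rollover_fix_test apply_rollover_fix_test apply_rollover_fix_test_alt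
  by_cases h : data.length ≤ 2
  · simp [h]
  · simp only [h, if_false]
    match data, h with
    | x :: rest, h =>
      have hA := pv_A_loop c rest [] x 0
      simp only [List.nil_append, List.length_nil, Nat.cast_zero, zero_add, add_zero,
        List.map_id'] at hA
      simp only [List.tail_cons, List.take_succ_cons, List.take_zero]
      rw [hA, pv_B_fold c rest x 0 [x]]
      simp
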